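-- pv_equiv track=rewrite | github.com/lautaromarin10/TP-Integrador-2 | utilidades.py | conjunto_sin_repetidos
-- ===== SOURCE A (Python) =====
-- def conjunto_sin_repetidos(conjunto: list):
--     digitos_sin_repetir = []
--
--     for numero in conjunto:
--         # Convertir el número a string y luego cada dígito de vuelta a int
--         digitos = [int(digito) for digito in str(numero)]
--         for d in digitos:
--             if d not in digitos_sin_repetir:
--                 digitos_sin_repetir.append(d)
--
--     return digitos_sin_repetir
-- ===== SOURCE B (Python) =====
-- def conjunto_sin_repetidos(conjunto: list):
--     # Flatten all digits in order (same element/char order as A, so int() on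
--     # '-' etc. raises at the same place), then dedupe recursively: take the
--     # head, filter it out of the rest, recurse -- no seen-set, no membership
--     # scan against an accumulator. Depth is at most 10 (distinct digits).
--     todos = [int(digito) for numero in conjunto for digito in str(numero)]
--
--     def nub(resto):
--         if not resto:
--             return []
--         primero = resto[0]
--         return [primero] + nub([x for x in resto[1:] if x != primero])
--
--     return nub(todos)
-- ===== Notes on version B (the rewrite author's own statement) =====
-- stated objective: alternative
-- what changed: A's single interleaved loop that checks each digit against a growing seen-list is replaced by a flattening pass followed by a recursive head-and-filter nub: take the first digit, filter all its copies out of the remainder, recurse; there is no seen accumulator or membership test at all.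
import Mathlib
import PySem

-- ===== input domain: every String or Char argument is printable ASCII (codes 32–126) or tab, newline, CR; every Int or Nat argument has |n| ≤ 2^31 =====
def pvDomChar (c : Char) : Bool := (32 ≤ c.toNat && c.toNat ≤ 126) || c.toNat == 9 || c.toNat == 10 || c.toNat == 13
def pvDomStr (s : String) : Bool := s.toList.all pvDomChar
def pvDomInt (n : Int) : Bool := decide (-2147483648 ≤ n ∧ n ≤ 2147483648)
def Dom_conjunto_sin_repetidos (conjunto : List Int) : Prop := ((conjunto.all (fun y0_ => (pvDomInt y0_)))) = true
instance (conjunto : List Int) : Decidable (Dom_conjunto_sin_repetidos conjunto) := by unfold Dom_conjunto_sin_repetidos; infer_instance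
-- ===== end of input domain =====

-- B replaces A's seen-list membership loop by a flatten pass plus a recursive head-and-filter nub (alternative decomposition, same cost).

-- ===== PORT A =====
-- int(digito) on a single digit char; inside Pre_ every char of str(numero) is a digit,
-- so getD 0 is never taken there (negative numbers, where int('-') raises, are outside Pre_).
def pvDigitos (numero : Int) : List Int :=
  (PySem.Int.toChars numero).map (fun c => (PySem.Int.ofChars? [c]).getD 0)

def conjunto_sin_repetidos (conjunto : List Int) : List Int :=
  conjunto.foldl (fun digitos_sin_repetir numero =>
    (pvDigitos numero).foldl
      (fun acc d => if d ∈ acc then acc else acc ++ [d]) digitos_sin_repetir) []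

-- ===== PORT B =====
-- recursive nub: head, then recurse on the tail with the head's copies filtered out
def pvNub : List Int → List Int
  | [] => []
  | primero :: resto => primero :: pvNub (resto.filter (fun x => x ≠ primero))
termination_by l => l.length
decreasing_by
  simp only [List.length_unattach, List.length_cons]
  exact Nat.lt_succ_of_le (Nat.le_trans (List.length_filter_le _ _)
    (Nat.le_of_eq List.length_attach))

def conjunto_sin_repetidos_alt (conjunto : List Int) : List Int :=
  pvNub (conjunto.flatMap (fun numero => pvDigitos numero))

-- ===== PRECONDITION & SPEC =====
-- Pre_ excludes lists containing a negative number: there str(numero) starts with '-' and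
-- int('-') raises ValueError in A (and at the same character in B).
def Pre_conjunto_sin_repetidos (conjunto : List Int) : Prop := ∀ n ∈ conjunto, 0 ≤ n
instance (conjunto : List Int) : Decidable (Pre_conjunto_sin_repetidos conjunto) := by unfold Pre_conjunto_sin_repetidos; infer_instance
def pvWitness_conjunto_sin_repetidos : List Int := [123, 321, 405]
def Spec_conjunto_sin_repetidos (conjunto : List Int) (out : List Int) : Prop := out = conjunto_sin_repetidos_alt conjunto
instance (conjunto : List Int) (out : List Int) : Decidable (Spec_conjunto_sin_repetidos conjunto out) := by unfold Spec_conjunto_sin_repetidos; infer_instance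

-- ===== CLAIM (what is proved, stated in full; the proofs are below) =====
def Claim_equal_conjunto_sin_repetidos : Prop := ∀ (conjunto : List Int), Dom_conjunto_sin_repetidos conjunto → Pre_conjunto_sin_repetidos conjunto → Spec_conjunto_sin_repetidos conjunto (conjunto_sin_repetidos conjunto)

-- ===== LEMMAS AND PROOFS =====
theorem pv_foldl_flatMap {α β σ : Type} (g : σ → β → σ) (digs : α → List β) :
    ∀ (l : List α) (acc : σ),
      l.foldl (fun a n => (digs n).foldl g a) acc = (l.flatMap digs).foldl g acc := by
  intro l
  induction l with
  | nil => intro acc; simp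
  | cons x xs ih => intro acc; simp [List.flatMap_cons, List.foldl_append, ih]

theorem pvNub_nil : pvNub [] = [] := by rw [pvNub]

theorem pvNub_cons (x : Int) (l : List Int) :
    pvNub (x :: l) = x :: pvNub (l.filter (fun y => decide (y ≠ x))) := by rw [pvNub]

-- A's dedup fold from accumulator acc appends exactly the nub of the not-yet-seen elements.
theorem pv_foldl_nub (xs : List Int) : ∀ (acc : List Int),
    xs.foldl (fun a d => if d ∈ a then a else a ++ [d]) acc
      = acc ++ pvNub (xs.filter (fun y => decide (y ∉ acc))) := by
  induction xs with
  | nil => intro acc; simp [pvNub_nil]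
  | cons x xs ih =>
    intro acc
    by_cases hx : x ∈ acc
    · rw [List.foldl_cons, if_pos hx, List.filter_cons, if_neg (by simp [hx]), ih acc]
    · have hfil : xs.filter (fun y => decide (y ∉ acc ++ [x]))
          = (xs.filter (fun y => decide (y ∉ acc))).filter (fun y => decide (y ≠ x)) := by
        rw [List.filter_filter]
        apply List.filter_congr
        intro y _
        simp [List.mem_append, not_or, and_comm]
      rw [List.foldl_cons, if_neg hx, List.filter_cons, if_pos (by simp [hx]),
        ih (acc ++ [x]), pvNub_cons, ← hfil]
      simp

-- ===== VERDICT (by name: the statement is the Claim_ definition above) =====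
theorem conjunto_sin_repetidos_spec : Claim_equal_conjunto_sin_repetidos := by
  intro conjunto _ _
  unfold Spec_conjunto_sin_repetidos conjunto_sin_repetidos conjunto_sin_repetidos_alt
  rw [pv_foldl_flatMap, pv_foldl_nub]
  simp
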